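-- pv_equiv track=rewrite | github.com/charmse/advent-of-code | 2020/day09/solution.py | part_two
-- ===== SOURCE A (Python) =====
-- import itertools
--
-- def part_one(ns, pre):
--     for i in range(len(ns[pre:])):
--         if i + pre >= len(ns):
--             break
--         pre_ns = ns[i:i+pre]
--         rest = ns[pre+i:]
--         combos = list(map(lambda x: x[0] + x[1], itertools.combinations(pre_ns, 2)))
--         if rest[0] not in combos:
--             return rest[0]
--             break
--
-- def part_two(ns, pre):
--     invalid_n = part_one(ns, pre)
--     for r in range(2, 20):
--         for i in range(len(ns)):
--             n = ns[i:i+r]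
--             if sum(n) == invalid_n:
--                 return max(n) + min(n)
--     return invalid_n
-- ===== SOURCE B (Python) =====
-- import itertools
--
-- def _find_invalid(ns, pre):
--     # first element after its preamble window that no two window entries sum
--     # to, found with a hash-set two-sum scan over enumerate(ns[pre:])
--     for i, target in enumerate(ns[pre:]):
--         seen = set()
--         for x in ns[i:i + pre]:
--             if target - x in seen:
--                 break
--             seen.add(x)
--         else:
--             return target
--     return None
--
-- def part_two(ns, pre):
--     invalid = _find_invalid(ns, pre)
--     if invalid is None:
--         return None
--     P = list(itertools.accumulate(ns, initial=0))
--     n = len(ns)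
--     for r in range(2, 20):
--         sums = [P[min(i + r, n)] - P[i] for i in range(n)]
--         if invalid in sums:
--             i = sums.index(invalid)
--             w = ns[i:i + r]
--             return max(w) + min(w)
--     return invalid
-- ===== Notes on version B (the rewrite author's own statement) =====
-- stated objective: alternative
-- what changed: part_one's per-position itertools.combinations pair-sum list is replaced by a hash-set two-sum scan driven by enumerate(ns[pre:]), and part_two's per-window sum(ns[i:i+r]) rescans by one itertools.accumulate prefix array from which, per window length r, a window-sum list is built by subtraction and the answer located with list membership + .index.
-- outside the precondition, e.g. on part_two([1, 2], 5): A returns None, B returns None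
import Mathlib
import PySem

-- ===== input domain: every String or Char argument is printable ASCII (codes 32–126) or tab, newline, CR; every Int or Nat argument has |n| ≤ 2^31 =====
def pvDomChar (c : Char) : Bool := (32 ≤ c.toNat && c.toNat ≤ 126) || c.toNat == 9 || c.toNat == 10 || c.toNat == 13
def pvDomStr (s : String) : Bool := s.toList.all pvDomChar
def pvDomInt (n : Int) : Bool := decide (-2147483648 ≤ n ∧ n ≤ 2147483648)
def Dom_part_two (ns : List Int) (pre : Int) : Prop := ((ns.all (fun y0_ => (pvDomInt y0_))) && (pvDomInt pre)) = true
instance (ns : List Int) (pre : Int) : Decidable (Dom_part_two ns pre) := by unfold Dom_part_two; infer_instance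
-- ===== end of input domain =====

-- B replaces the per-position itertools.combinations pair enumeration by a hash-set two-sum
-- scan over enumerate(ns[pre:]), and the repeated window sums by one accumulate prefix array
-- with a per-length window-sum list located via membership + .index (objective: alternative).

-- ===== PORT A =====
-- combos = list(map(lambda x: x[0] + x[1], itertools.combinations(pre_ns, 2)))
def combosA (w : List Int) : List Int :=
  (PySem.List.combinations w 2).map
    (fun c => PySem.List.pyGetD c 0 0 + PySem.List.pyGetD c 1 0)

-- the 'for i in range(len(ns[pre:]))' loop of part_one (first return wins; None = none)
def partOneLoopA (ns : List Int) (pre : Int) : List Nat → Option Int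
  | [] => none
  | i :: rest =>
    if (ns.length : Int) ≤ (i : Int) + pre then none   -- break: loop ends, part_one returns None
    else
      let pre_ns := PySem.List.slice ns (some (i : Int)) (some ((i : Int) + pre))
      let restL := PySem.List.slice ns (some (pre + (i : Int))) none
      match PySem.List.pyGet? restL 0 with
      | none => none            -- rest[0]: IndexError (unreachable in the loop; excluded by Pre_)
      | some r0 => if r0 ∈ combosA pre_ns then partOneLoopA ns pre rest else some r0

def partOneA (ns : List Int) (pre : Int) : Option Int :=
  partOneLoopA ns pre (List.range (PySem.List.slice ns (some pre) none).length)

-- inner 'for i in range(len(ns))' of part_two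
def searchInnerA (ns : List Int) (inv r : Int) : List Int → Option Int
  | [] => none
  | i :: rest =>
    let n := PySem.List.slice ns (some i) (some (i + r))
    if n.sum = inv then
      some ((PySem.List.max? n (fun x => x)).getD 0 + (PySem.List.min? n (fun x => x)).getD 0)
    else searchInnerA ns inv r rest

-- outer 'for r in range(2, 20)'
def searchOuterA (ns : List Int) (inv : Int) : List Int → Option Int
  | [] => none
  | r :: rest =>
    match searchInnerA ns inv r (PySem.List.pyRange 0 ns.length 1) with
    | some v => some v
    | none => searchOuterA ns inv rest

def part_two (ns : List Int) (pre : Int) : Int :=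
  match partOneA ns pre with
  | none => 0     -- Python returns None here (part_one found nothing); excluded by Pre_
  | some inv => (searchOuterA ns inv (PySem.List.pyRange 2 20 1)).getD inv

-- ===== PORT B =====
-- the 'for x in ns[i:i+pre]' two-sum scan with the growing 'seen' set (for/else: true = broke out)
def twoSumB (t : Int) : List Int → PySem.Set Int → Bool
  | [], _ => false
  | x :: xs, seen =>
    if PySem.Set.contains seen (t - x) then true else twoSumB t xs (PySem.Set.add seen x)

-- 'for i, target in enumerate(ns[pre:])' of _find_invalid
def findInvB (ns : List Int) (pre : Int) : List (Int × Int) → Option Int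
  | [] => none
  | (i, target) :: rest =>
    if twoSumB target (PySem.List.slice ns (some i) (some (i + pre))) PySem.Set.empty
    then findInvB ns pre rest
    else some target

def partOneB (ns : List Int) (pre : Int) : Option Int :=
  findInvB ns pre (PySem.List.enumerate (PySem.List.slice ns (some pre) none) 0)

-- P = list(itertools.accumulate(ns, initial=0))
def prefixP (ns : List Int) : List Int := List.scanl (· + ·) 0 ns

-- sums = [P[min(i + r, n)] - P[i] for i in range(n)]
def sumsB (P : List Int) (n r : Int) : List Int :=
  (PySem.List.pyRange 0 n 1).map
    (fun i => PySem.List.pyGetD P (min (i + r) n) 0 - PySem.List.pyGetD P i 0)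

-- 'for r in range(2, 20): … if invalid in sums: i = sums.index(invalid); …'
def searchB (ns P : List Int) (inv : Int) : List Int → Option Int
  | [] => none
  | r :: rs =>
    let sums := sumsB P (ns.length : Int) r
    if inv ∈ sums then
      match PySem.List.index? sums inv with
      | some i =>
        let w := PySem.List.slice ns (some (i : Int)) (some ((i : Int) + r))
        some ((PySem.List.max? w (fun x => x)).getD 0 + (PySem.List.min? w (fun x => x)).getD 0)
      | none => none             -- unreachable: guarded by 'invalid in sums'
    else searchB ns P inv rs

def part_two_alt (ns : List Int) (pre : Int) : Int :=
  match partOneB ns pre with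
  | none => 0     -- B's Python returns None here; excluded by Pre_
  | some inv => (searchB ns (prefixP ns) inv (PySem.List.pyRange 2 20 1)).getD inv

-- ===== PRECONDITION & SPEC =====
-- Pre_ holds exactly when part_one finds an invalid number (some position after its preamble
-- window whose value is no sum of two window entries); otherwise Python's part_two returns
-- None, which is not an Int.
def Pre_part_two (ns : List Int) (pre : Int) : Prop :=
  ∃ i, i < (PySem.List.slice ns (some pre) none).length ∧
    ∀ a, a < (PySem.List.slice ns (some (i : Int)) (some ((i : Int) + pre))).length →
    ∀ b, b < (PySem.List.slice ns (some (i : Int)) (some ((i : Int) + pre))).length →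
      a < b →
      (PySem.List.slice ns (some (i : Int)) (some ((i : Int) + pre))).getD a 0 +
        (PySem.List.slice ns (some (i : Int)) (some ((i : Int) + pre))).getD b 0 ≠
        (PySem.List.slice ns (some (pre + (i : Int))) none).getD 0 0

instance (ns : List Int) (pre : Int) : Decidable (Pre_part_two ns pre) := by
  unfold Pre_part_two; infer_instance

def pvWitness_part_two : List Int × Int := ([35, 20, 15, 25, 47, 40], 2)

def Spec_part_two (ns : List Int) (pre : Int) (out : Int) : Prop := out = part_two_alt ns pre
instance (ns : List Int) (pre : Int) (out : Int) : Decidable (Spec_part_two ns pre out) := by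
  unfold Spec_part_two; infer_instance

-- ===== CLAIM (what is proved, stated in full; the proofs are below) =====
def Claim_equal_part_two : Prop := ∀ (ns : List Int) (pre : Int), Dom_part_two ns pre → Pre_part_two ns pre → Spec_part_two ns pre (part_two ns pre)

-- ===== LEMMAS AND PROOFS =====

theorem combosA_nil : combosA [] = [] := rfl

theorem combosA_cons (x : Int) (xs : List Int) :
    combosA (x :: xs) = xs.map (fun y => x + y) ++ combosA xs := by
  unfold combosA
  rw [PySem.List.combinations_cons_succ, PySem.List.combinations_one]
  simp [PySem.List.pyGetD, PySem.List.pyGet?, PySem.List.pyIdx?]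

theorem twoSumB_iff (t : Int) (w : List Int) (seen : List Int) :
    twoSumB t w seen = true ↔ (∃ y ∈ w, t - y ∈ seen) ∨ t ∈ combosA w := by
  induction w generalizing seen with
  | nil => simp [twoSumB, combosA_nil]
  | cons x xs ih =>
    rw [combosA_cons]
    simp only [twoSumB]
    by_cases hx : (t - x) ∈ seen
    · rw [(PySem.Set.contains_iff seen (t - x)).mpr hx, if_pos rfl]
      exact iff_of_true rfl (Or.inl ⟨x, by simp, hx⟩)
    · have hc : PySem.Set.contains seen (t - x) = false := by
        rw [Bool.eq_false_iff]; intro h; exact hx ((PySem.Set.contains_iff seen (t - x)).mp h)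
      rw [hc]
      simp only [if_false, Bool.false_eq_true, ih]
      constructor
      · rintro (⟨y, hy, hmem⟩ | hcomb)
        · rw [PySem.Set.mem_add] at hmem
          rcases hmem with h | h
          · exact Or.inl ⟨y, List.mem_cons_of_mem _ hy, h⟩
          · refine Or.inr ?_
            rw [List.mem_append, List.mem_map]
            exact Or.inl ⟨y, hy, by omega⟩
        · exact Or.inr (by rw [List.mem_append]; exact Or.inr hcomb)
      · rintro (⟨y, hy, hmem⟩ | hcomb)
        · rcases List.mem_cons.mp hy with rfl | hy'
          · exact absurd hmem hx
          · exact Or.inl ⟨y, hy', by rw [PySem.Set.mem_add]; exact Or.inl hmem⟩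
        · rw [List.mem_append] at hcomb
          rcases hcomb with h | h
          · rw [List.mem_map] at h
            obtain ⟨y, hy, hxy⟩ := h
            exact Or.inl ⟨y, hy, by rw [PySem.Set.mem_add]; right; omega⟩
          · exact Or.inr h

theorem range_bound (ns : List Int) (pre : Int) (i : Nat)
    (hi : i < (PySem.List.slice ns (some pre) none).length) : (i : Int) + pre < ns.length := by
  rw [PySem.List.slice_some_none, List.length_drop] at hi
  by_cases hp : 0 ≤ pre
  · have hcast : pre = ((pre.toNat : Nat) : Int) := by omega
    rw [hcast, PySem.List.clampIdx_natCast] at hi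
    omega
  · have hk : 0 < (-pre).toNat := by omega
    have hcast : pre = -(((-pre).toNat : Nat) : Int) := by omega
    rw [hcast, PySem.List.clampIdx_neg_natCast _ _ hk] at hi
    omega

-- the clamped start of ns[pre+j:] is (clamped start of ns[pre:]) + j, for j still in range
theorem clampIdx_pre_add (ns : List Int) (pre : Int) (hpre : 0 ≤ (ns.length : Int) + pre)
    (j : Nat) (hj : j < (PySem.List.slice ns (some pre) none).length) :
    PySem.List.clampIdx ns.length (pre + (j : Int)) =
      PySem.List.clampIdx ns.length pre + j := by
  rw [PySem.List.slice_some_none, List.length_drop] at hj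
  by_cases hp : 0 ≤ pre
  · have hc1 : pre = ((pre.toNat : Nat) : Int) := by omega
    rw [hc1, PySem.List.clampIdx_natCast] at hj ⊢
    have hc2 : ((pre.toNat : Nat) : Int) + (j : Int) = (((pre.toNat + j : Nat)) : Int) := by
      push_cast; ring
    rw [hc2, PySem.List.clampIdx_natCast]
    omega
  · have hk : 0 < (-pre).toNat := by omega
    have hc1 : pre = -(((-pre).toNat : Nat) : Int) := by omega
    rw [hc1, PySem.List.clampIdx_neg_natCast _ _ hk] at hj ⊢
    by_cases hz : j < (-pre).toNat - ns.length + ns.length ∧ (-pre).toNat ≤ ns.length + j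
    · have hc2 : -(((-pre).toNat : Nat) : Int) + (j : Int) =
          -((((-pre).toNat - j : Nat)) : Int) := by omega
      by_cases hjz : (-pre).toNat ≤ j
      · have : -(((-pre).toNat : Nat) : Int) + (j : Int) = (((j - (-pre).toNat : Nat)) : Int) := by
          omega
        rw [this, PySem.List.clampIdx_natCast]
        omega
      · have hk2 : 0 < ((-pre).toNat - j) := by omega
        rw [hc2, PySem.List.clampIdx_neg_natCast _ _ (by omega)]
        omega
    · omega

-- ns[pre+j:][0] is the j-th element of ns[pre:] (when ns[pre:] clamps from the front, j in range)
theorem targetA_eq (ns : List Int) (pre : Int) (hpre : 0 ≤ (ns.length : Int) + pre)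
    (j : Nat) (hj : j < (PySem.List.slice ns (some pre) none).length) :
    PySem.List.pyGet? (PySem.List.slice ns (some (pre + (j : Int))) none) 0 =
      some ((PySem.List.slice ns (some pre) none)[j]'hj) := by
  have hlen := hj
  rw [PySem.List.slice_some_none, List.length_drop] at hlen
  have hidx : PySem.List.clampIdx ns.length pre + j < ns.length := by omega
  have hgj : (PySem.List.slice ns (some pre) none)[j]'hj = ns[PySem.List.clampIdx ns.length pre + j]'hidx := by
    simp [PySem.List.slice_some_none]
  rw [PySem.List.slice_some_none, clampIdx_pre_add ns pre hpre j hj, hgj]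
  simp [PySem.List.pyGet?, PySem.List.pyIdx?, List.getElem?_drop, hidx]

theorem partOne_lockstep (ns : List Int) (pre : Int) (hpre : 0 ≤ (ns.length : Int) + pre) :
    ∀ (m j : Nat), j + m = (PySem.List.slice ns (some pre) none).length →
      partOneLoopA ns pre (List.range' j m) =
        findInvB ns pre
          (PySem.List.enumerate ((PySem.List.slice ns (some pre) none).drop j) (j : Int)) := by
  intro m
  induction m with
  | zero =>
    intro j hj
    rw [List.drop_of_length_le (by omega)]
    rfl
  | succ m ih =>
    intro j hj
    have hjlt : j < (PySem.List.slice ns (some pre) none).length := by omega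
    rw [List.range'_succ, List.drop_eq_getElem_cons hjlt, PySem.List.enumerate_cons]
    simp only [partOneLoopA, findInvB]
    rw [if_neg (by have := range_bound ns pre j hjlt; omega)]
    rw [targetA_eq ns pre hpre j hjlt]
    have hiff : (PySem.List.slice ns (some pre) none)[j]'hjlt ∈
          combosA (PySem.List.slice ns (some (j : Int)) (some ((j : Int) + pre)))
        ↔ twoSumB ((PySem.List.slice ns (some pre) none)[j]'hjlt)
            (PySem.List.slice ns (some (j : Int)) (some ((j : Int) + pre)))
            PySem.Set.empty = true := by
      rw [twoSumB_iff]
      have : ¬ ∃ y ∈ PySem.List.slice ns (some (j : Int)) (some ((j : Int) + pre)),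
          (PySem.List.slice ns (some pre) none)[j]'hjlt - y ∈ (PySem.Set.empty : PySem.Set Int) := by
        rintro ⟨y, _, hmem⟩; simp [PySem.Set.empty] at hmem
      tauto
    have hrec := ih (j + 1) (by omega)
    push_cast at hrec
    show (if (PySem.List.slice ns (some pre) none)[j]'hjlt ∈
            combosA (PySem.List.slice ns (some (j : Int)) (some ((j : Int) + pre))) then
          partOneLoopA ns pre (List.range' (j + 1) m)
        else some ((PySem.List.slice ns (some pre) none)[j]'hjlt)) = _
    rw [if_congr hiff hrec rfl]

-- degenerate preamble: n + pre < 0 makes both loops return the head of ns at step 0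
theorem window_nil (ns : List Int) (pre : Int) (hneg : (ns.length : Int) + pre < 0) :
    PySem.List.slice ns (some ((0 : Nat) : Int)) (some (((0 : Nat) : Int) + pre)) = [] := by
  have hk : 0 < (-pre).toNat := by omega
  have hc : pre = -(((-pre).toNat : Nat) : Int) := by omega
  apply List.eq_nil_of_length_eq_zero
  rw [PySem.List.length_slice]
  have h0 : (((0 : Nat) : Int)) = (0 : Int) := by norm_num
  rw [h0]
  have hz : (0 : Int) + pre = pre := by ring
  rw [hz, hc, PySem.List.clampIdx_neg_natCast _ _ hk]
  have : PySem.List.clampIdx ns.length ((0 : Int)) = 0 := by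
    have : ((0 : Int)) = (((0 : Nat)) : Int) := by norm_num
    rw [this, PySem.List.clampIdx_natCast]
    omega
  omega

theorem partOne_eq (ns : List Int) (pre : Int) : partOneA ns pre = partOneB ns pre := by
  unfold partOneA partOneB
  by_cases hpre : 0 ≤ (ns.length : Int) + pre
  · rw [List.range_eq_range']
    have := partOne_lockstep ns pre hpre (PySem.List.slice ns (some pre) none).length 0 (by omega)
    rw [this, List.drop_zero]
    norm_num
  · -- n + pre < 0: ns[pre:] = ns, and both return at the very first step (empty window)
    replace hpre : (ns.length : Int) + pre < 0 := by omega
    have hk : 0 < (-pre).toNat := by omega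
    have hc : pre = -(((-pre).toNat : Nat) : Int) := by omega
    have htail : PySem.List.slice ns (some pre) none = ns := by
      rw [PySem.List.slice_some_none, hc, PySem.List.clampIdx_neg_natCast _ _ hk]
      have : ns.length - (-pre).toNat = 0 := by omega
      rw [this, List.drop_zero]
    rw [htail]
    cases ns with
    | nil => rfl
    | cons x xs =>
      have hneg : ((x :: xs).length : Int) + pre < 0 := hpre
      rw [show (x :: xs).length = xs.length + 1 from rfl, List.range_succ_eq_map,
        PySem.List.enumerate_cons]
      simp only [partOneLoopA, findInvB]
      rw [if_neg (by simp only [List.length_cons]; push_cast; omega)]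
      have hwnil := window_nil (x :: xs) pre hneg
      have hw0 : PySem.List.slice (x :: xs) (some (0 : Int)) (some ((0 : Int) + pre)) = [] := by
        have : ((0 : Nat) : Int) = (0 : Int) := by norm_num
        rw [← this]; exact hwnil
      rw [hwnil, hw0]
      have hr0 : PySem.List.pyGet?
          (PySem.List.slice (x :: xs) (some (pre + ((0 : Nat) : Int))) none) 0 = some x := by
        have : pre + ((0 : Nat) : Int) = pre := by norm_num
        rw [this, PySem.List.slice_some_none, hc,
          PySem.List.clampIdx_neg_natCast _ _ hk]
        have : (x :: xs).length - (-pre).toNat = 0 := by omega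
        rw [this, List.drop_zero]
        simp [PySem.List.pyGet?, PySem.List.pyIdx?]
      rw [hr0]
      simp [combosA_nil, twoSumB]

-- prefix array: P[k] = sum of the first k elements
theorem scanl_getD (ns : List Int) (s : Int) (k : Nat) (hk : k ≤ ns.length) :
    (List.scanl (· + ·) s ns).getD k 0 = s + (ns.take k).sum := by
  induction ns generalizing s k with
  | nil =>
    have hk0 : k = 0 := by simpa using hk
    subst hk0
    simp
  | cons x xs ih =>
    cases k with
    | zero => simp
    | succ k =>
      simp only [List.scanl_cons, List.getD_cons_succ, List.take_succ_cons, List.sum_cons]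
      rw [ih (s + x) k (by simpa using hk)]
      ring

theorem getD_prefixP (ns : List Int) (k : Nat) (hk : k ≤ ns.length) :
    (prefixP ns).getD k 0 = (ns.take k).sum := by
  unfold prefixP
  rw [scanl_getD ns 0 k hk]
  ring

theorem length_prefixP (ns : List Int) : (prefixP ns).length = ns.length + 1 := by
  unfold prefixP
  rw [List.length_scanl]

theorem sum_drop_take (ns : List Int) (a m : Nat) :
    ((ns.drop a).take m).sum = (ns.take (a + m)).sum - (ns.take a).sum := by
  rw [List.take_add, List.sum_append]
  ring

theorem take_clamp_sum (ns : List Int) (m : Nat) :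
    (ns.take (min m ns.length)).sum = (ns.take m).sum := by
  rcases le_or_gt m ns.length with h | h
  · rw [min_eq_left h]
  · rw [min_eq_right (by omega), List.take_length, List.take_of_length_le (by omega)]

-- the prefix-difference entry equals the window sum
theorem cond_eq (ns : List Int) (i r : Int) (h0 : 0 ≤ i) (hi : i < ns.length) (hr : 0 ≤ r) :
    PySem.List.pyGetD (prefixP ns) (min (i + r) (ns.length : Int)) 0 -
      PySem.List.pyGetD (prefixP ns) i 0 =
    (PySem.List.slice ns (some i) (some (i + r))).sum := by
  have hlen := length_prefixP ns
  have h1 : PySem.List.pyGetD (prefixP ns) i 0 = (ns.take i.toNat).sum := by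
    rw [PySem.List.pyGetD_eq_getElem (prefixP ns) 0 h0 (by rw [hlen]; push_cast; omega),
      ← List.getD_eq_getElem (prefixP ns) 0 (by rw [hlen]; omega)]
    exact getD_prefixP ns i.toNat (by omega)
  have hmin0 : (0 : Int) ≤ min (i + r) (ns.length : Int) := by omega
  have h2 : PySem.List.pyGetD (prefixP ns) (min (i + r) (ns.length : Int)) 0 =
      (ns.take ((i + r).toNat)).sum := by
    rw [PySem.List.pyGetD_eq_getElem (prefixP ns) 0 hmin0 (by rw [hlen]; push_cast; omega),
      ← List.getD_eq_getElem (prefixP ns) 0 (by rw [hlen]; omega)]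
    rw [getD_prefixP ns _ (by omega)]
    have : (min (i + r) (ns.length : Int)).toNat = min ((i + r).toNat) ns.length := by omega
    rw [this, take_clamp_sum]
  rw [h1, h2, PySem.List.slice_toNat ns h0 (by omega), sum_drop_take]
  have : i.toNat + ((i + r).toNat - i.toNat) = (i + r).toNat := by omega
  rw [this]

-- the window value A returns at index i (proof-only abbreviation)
def valAt (ns : List Int) (i r : Int) : Int :=
  (PySem.List.max? (PySem.List.slice ns (some i) (some (i + r))) (fun x => x)).getD 0 +
    (PySem.List.min? (PySem.List.slice ns (some i) (some (i + r))) (fun x => x)).getD 0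

-- A's inner scan = first index of inv in the prefix-difference list
theorem inner_eq (ns : List Int) (inv r : Int) (hr : 0 ≤ r) :
    ∀ (m : Nat) (a : Int), 0 ≤ a → ((ns.length : Int) - a).toNat = m →
      searchInnerA ns inv r (PySem.List.pyRange a ns.length 1) =
        (match PySem.List.index?
            ((PySem.List.pyRange a ns.length 1).map
              (fun i => PySem.List.pyGetD (prefixP ns) (min (i + r) (ns.length : Int)) 0 -
                PySem.List.pyGetD (prefixP ns) i 0)) inv with
          | some j => some (valAt ns (a + (j : Int)) r)
          | none => none) := by
  intro m
  induction m with
  | zero =>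
    intro a ha hm
    rw [PySem.List.pyRange_one_eq_nil (by omega)]
    rfl
  | succ m ih =>
    intro a ha hm
    rw [PySem.List.pyRange_one_cons (by omega), List.map_cons]
    simp only [searchInnerA]
    have hfa := cond_eq ns a r ha (by omega) hr
    by_cases h : (PySem.List.slice ns (some a) (some (a + r))).sum = inv
    · rw [if_pos h]
      have hhead : PySem.List.pyGetD (prefixP ns) (min (a + r) (ns.length : Int)) 0 -
          PySem.List.pyGetD (prefixP ns) a 0 = inv := by rw [hfa, h]
      rw [hhead, PySem.List.index?_cons_self]
      show some (valAt ns a r) = some (valAt ns (a + ((0 : Nat) : Int)) r)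
      norm_num
    · rw [if_neg h]
      have hne : PySem.List.pyGetD (prefixP ns) (min (a + r) (ns.length : Int)) 0 -
          PySem.List.pyGetD (prefixP ns) a 0 ≠ inv := by rw [hfa]; exact h
      rw [PySem.List.index?_cons_of_ne _ hne]
      rw [ih (a + 1) (by omega) (by omega)]
      cases hidx : PySem.List.index?
          ((PySem.List.pyRange (a + 1) ns.length 1).map
            (fun i => PySem.List.pyGetD (prefixP ns) (min (i + r) (ns.length : Int)) 0 -
              PySem.List.pyGetD (prefixP ns) i 0)) inv with
      | none => rfl
      | some j =>
        simp only [Option.map_some]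
        have : a + 1 + (j : Int) = a + (((j + 1 : Nat)) : Int) := by push_cast; ring
        rw [this]

theorem search_eq (ns : List Int) (inv : Int) :
    ∀ (rs : List Int), (∀ r ∈ rs, 0 ≤ r) →
      searchOuterA ns inv rs = searchB ns (prefixP ns) inv rs := by
  intro rs
  induction rs with
  | nil => intro _; rfl
  | cons r rest ih =>
    intro h
    have hr : 0 ≤ r := h r List.mem_cons_self
    simp only [searchOuterA, searchB]
    rw [inner_eq ns inv r hr ((ns.length : Int) - 0).toNat 0 le_rfl rfl]
    cases hidx : PySem.List.index?
        ((PySem.List.pyRange 0 (ns.length : Int) 1).map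
          (fun i => PySem.List.pyGetD (prefixP ns) (min (i + r) (ns.length : Int)) 0 -
            PySem.List.pyGetD (prefixP ns) i 0)) inv with
    | none =>
      have hmem : inv ∉ sumsB (prefixP ns) (ns.length : Int) r := by
        rw [← PySem.List.index?_eq_none_iff]
        exact hidx
      rw [if_neg hmem]
      show searchOuterA ns inv rest = searchB ns (prefixP ns) inv rest
      exact ih (fun r' hr' => h r' (List.mem_cons_of_mem _ hr'))
    | some j =>
      have hmem : inv ∈ sumsB (prefixP ns) (ns.length : Int) r := by
        rw [← PySem.List.index?_isSome_iff]
        rw [show sumsB (prefixP ns) (ns.length : Int) r =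
          ((PySem.List.pyRange 0 (ns.length : Int) 1).map
            (fun i => PySem.List.pyGetD (prefixP ns) (min (i + r) (ns.length : Int)) 0 -
              PySem.List.pyGetD (prefixP ns) i 0)) from rfl, hidx]
        rfl
      rw [if_pos hmem]
      rw [show sumsB (prefixP ns) (ns.length : Int) r =
        ((PySem.List.pyRange 0 (ns.length : Int) 1).map
          (fun i => PySem.List.pyGetD (prefixP ns) (min (i + r) (ns.length : Int)) 0 -
            PySem.List.pyGetD (prefixP ns) i 0)) from rfl, hidx]
      show some (valAt ns (0 + (j : Int)) r) = some (valAt ns (j : Int) r)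
      norm_num

-- ===== VERDICT (by name: the statement is the Claim_ definition above) =====
theorem part_two_spec : Claim_equal_part_two := by
  intro ns pre _ _
  unfold Spec_part_two part_two part_two_alt
  rw [partOne_eq]
  cases partOneB ns pre with
  | none => rfl
  | some inv =>
    show (searchOuterA ns inv (PySem.List.pyRange 2 20 1)).getD inv =
      (searchB ns (prefixP ns) inv (PySem.List.pyRange 2 20 1)).getD inv
    rw [search_eq ns inv _ (fun r hr => by rw [PySem.List.mem_pyRange_one] at hr; omega)]
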